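-- pv_equiv track=rewrite | github.com/marian37/advent-of-code-2025 | 11.py | dfs
-- ===== SOURCE A (Python) =====
-- def dfs(input, source, target):
--     result = 0
--     stack = []
--     stack.append(source)
--     while stack:
--         v = stack.pop()
--         if v == target:
--             result += 1
--             continue
--         if v in input:
--             for edge in input[v]:
--                 stack.append((edge))
--     return result
-- ===== SOURCE B (Python) =====
-- def dfs(input, source, target):
--     # Vertices reachable from source (never expanding target), then bottom-up
--     # value iteration of per-node path counts over the reachable keys only.
--     seen = {source: True}
--     frontier = [source]
--     while frontier:
--         v = frontier.pop()
--         if v != target: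
--             for e in input.get(v, []):
--                 if e not in seen:
--                     seen[e] = True
--                     frontier.append(e)
--     ks = [v for v in seen if v != target and v in input]
--     c = {}
--     for _ in range(len(ks) + 1):
--         c = {v: sum(c.get(e, 1 if e == target else 0) for e in input[v]) for v in ks}
--     return c.get(source, 1 if source == target else 0)
-- ===== Notes on version B (the rewrite author's own statement) =====
-- stated objective: alternative
-- what changed: A enumerates every source-to-target path with an explicit DFS stack (work proportional to the number of path prefixes, exponential on layered DAGs); B first collects the set of vertices reachable from the source and then computes per-node path counts by bottom-up value iteration over the reachable keys only.
import Mathlib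
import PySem

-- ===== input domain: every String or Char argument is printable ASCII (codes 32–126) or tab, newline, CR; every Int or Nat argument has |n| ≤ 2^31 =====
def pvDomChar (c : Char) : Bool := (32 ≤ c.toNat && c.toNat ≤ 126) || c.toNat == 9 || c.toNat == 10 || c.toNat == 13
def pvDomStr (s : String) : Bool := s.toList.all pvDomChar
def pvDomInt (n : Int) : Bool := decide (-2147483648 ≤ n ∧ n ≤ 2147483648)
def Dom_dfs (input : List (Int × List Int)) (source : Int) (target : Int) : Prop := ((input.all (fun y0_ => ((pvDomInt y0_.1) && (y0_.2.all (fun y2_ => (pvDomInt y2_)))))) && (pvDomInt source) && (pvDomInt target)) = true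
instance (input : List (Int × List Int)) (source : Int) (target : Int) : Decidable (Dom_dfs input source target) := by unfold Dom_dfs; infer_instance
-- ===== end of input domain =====

-- B replaces A's explicit-stack path enumeration (one unit of work per path prefix) by a reachable-set
-- scan followed by bottom-up value iteration of per-node path counts over the reachable keys only;
-- the return values agree on every input on which A terminates (Pre_: no cycle is reachable from the
-- source in the target-cut graph; on the excluded inputs A loops forever and returns nothing).

-- ===== PORT A =====
-- A's while-loop over the explicit stack; the fuel counter only makes the recursion total: on every
-- input satisfying Pre_dfs the fuel is proved sufficient, so it never alters the result.
-- Stack top is the list head; pushing input[v]'s edges in order makes the reversed list the new top segment.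


def dfsLoop (d : PySem.Dict Int (List Int)) (target : Int) : Nat → List Int → Int → Int
  | 0, _, r => r
  | _ + 1, [], r => r
  | f + 1, v :: s, r =>
    if v = target then dfsLoop d target f s (r + 1)
    else
      match d.get? v with
      | some edges => dfsLoop d target f (edges.reverse ++ s) r
      | none => dfsLoop d target f s r

-- fuel: proved to be at least the number of pops A performs on inputs satisfying Pre_dfs

def dfsFuel (d : PySem.Dict Int (List Int)) : Nat :=
  (d.values.flatten.length + 2) ^ (d.size + 2)

def dfs (input : List (Int × List Int)) (source : Int) (target : Int) : Int :=
  let d := PySem.Dict.ofList input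
  dfsLoop d target (dfsFuel d) [source] 0

-- bound used as BFS fuel below and as fixpoint iteration count in Pre_'s reachability
def pvN (d : PySem.Dict Int (List Int)) : Nat := d.values.flatten.length + 2

-- ===== PORT B =====
-- B-side helper: the reachable-set loop of Source B (seen/frontier), same stack convention as port A;
-- its fuel pvN d is proved sufficient on EVERY input (each iteration pops one entry and pushes only
-- never-seen vertices).

def bfsLoop (d : PySem.Dict Int (List Int)) (target : Int) :
    Nat → PySem.Dict Int Bool → List Int → PySem.Dict Int Bool
  | 0, seen, _ => seen
  | _ + 1, seen, [] => seen
  | f + 1, seen, v :: fr =>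
    if v = target then bfsLoop d target f seen fr
    else
      let p := (d.getD v []).foldl
        (fun (p : PySem.Dict Int Bool × List Int) e =>
          if p.1.contains e then p else (p.1.insert e true, p.2 ++ [e]))
        (seen, [])
      bfsLoop d target f p.1 (p.2.reverse ++ fr)

def dfs_alt (input : List (Int × List Int)) (source : Int) (target : Int) : Int :=
  let d := PySem.Dict.ofList input
  let seen := bfsLoop d target (pvN d) (PySem.Dict.ofList [(source, true)]) [source]
  let ks := seen.keys.filter (fun v => decide (v ≠ target) && d.contains v)
  let c := (List.range (ks.length + 1)).foldl
    (fun (c : PySem.Dict Int Int) _ =>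
      PySem.Dict.ofList (ks.map (fun v =>
        (v, ((d.getD v []).map (fun e => c.getD e (if e = target then (1 : Int) else 0))).sum))))
    PySem.Dict.empty
  c.getD source (if source = target then 1 else 0)

-- ===== PRECONDITION & SPEC =====
-- edge relation of the dict, cut at the target (A never expands the target vertex)

def pvAdj (d : PySem.Dict Int (List Int)) (t : Int) (v : Int) : List Int :=
  if v = t then [] else d.getD v []

-- one expansion step of a reachable vertex set

def pvF (d : PySem.Dict Int (List Int)) (t : Int) (S : Finset Int) : Finset Int :=
  S ∪ S.biUnion (fun v => (pvAdj d t v).toFinset)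

def pvReach (d : PySem.Dict Int (List Int)) (t : Int) (seed : Finset Int) : Finset Int :=
  (pvF d t)^[pvN d] seed

-- vertices reachable from v in at least one step

def pvRch (d : PySem.Dict Int (List Int)) (t : Int) (v : Int) : Finset Int :=
  pvReach d t (pvAdj d t v).toFinset

-- Pre_ excludes exactly the inputs on which A loops forever (never returns): those where some vertex
-- reachable from the source in the target-cut edge relation lies on a cycle.

def Pre_dfs (input : List (Int × List Int)) (source : Int) (target : Int) : Prop :=
  ∀ v ∈ pvReach (PySem.Dict.ofList input) target {source}, v ∉ pvRch (PySem.Dict.ofList input) target v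

instance (input : List (Int × List Int)) (source : Int) (target : Int) : Decidable (Pre_dfs input source target) := by unfold Pre_dfs; infer_instance

def pvWitness_dfs : (List (Int × List Int)) × Int × Int := ([(0, [1, 2]), (1, [2])], 0, 2)

def Spec_dfs (input : List (Int × List Int)) (source : Int) (target : Int) (out : Int) : Prop := out = dfs_alt input source target

instance (input : List (Int × List Int)) (source : Int) (target : Int) (out : Int) : Decidable (Spec_dfs input source target out) := by unfold Spec_dfs; infer_instance

-- ===== CLAIM (what is proved, stated in full; the proofs are below) =====

def Claim_equal_dfs : Prop := ∀ (input : List (Int × List Int)) (source : Int) (target : Int), Dom_dfs input source target → Pre_dfs input source target → Spec_dfs input source target (dfs input source target)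

-- ===== LEMMAS AND PROOFS =====

def pvU (d : PySem.Dict Int (List Int)) (source : Int) : Finset Int :=
  insert source d.values.flatten.toFinset

def pvRk (d : PySem.Dict Int (List Int)) (t : Int) (v : Int) : Nat :=
  (pvRch d t v ∩ (d.keys.toFinset.erase t)).card

lemma pvAdj_subset_flatten (d : PySem.Dict Int (List Int)) (t v : Int) :
    ∀ e ∈ pvAdj d t v, e ∈ d.values.flatten := by
  intro e he
  unfold pvAdj at he
  split at he
  · simp at he
  · rw [PySem.Dict.getD_eq_get?_getD] at he
    cases hg : d.get? v with
    | none => rw [hg] at he; simp at he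
    | some l =>
      rw [hg] at he; simp at he
      have : (v, l) ∈ d.items := PySem.Dict.mem_items_of_get?_eq_some d hg
      have hl : l ∈ d.values := List.mem_map.2 ⟨(v, l), this, rfl⟩
      exact List.mem_flatten.2 ⟨l, hl, he⟩

lemma subset_pvF (d : PySem.Dict Int (List Int)) (t : Int) (S : Finset Int) : S ⊆ pvF d t S :=
  Finset.subset_union_left

lemma pvF_mono (d : PySem.Dict Int (List Int)) (t : Int) {S T : Finset Int} (h : S ⊆ T) :
    pvF d t S ⊆ pvF d t T :=
  Finset.union_subset_union h (Finset.biUnion_subset_biUnion_of_subset_left _ h)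

lemma pvF_subset_U (d : PySem.Dict Int (List Int)) (t source : Int) {S : Finset Int}
    (h : S ⊆ pvU d source) : pvF d t S ⊆ pvU d source := by
  unfold pvF
  refine Finset.union_subset h (Finset.biUnion_subset.2 ?_)
  intro v _ e he
  simp only [List.mem_toFinset] at he
  exact Finset.mem_insert_of_mem (List.mem_toFinset.2 (pvAdj_subset_flatten d t v e he))

lemma iterate_subset_U (d : PySem.Dict Int (List Int)) (t source : Int) {S : Finset Int}
    (h : S ⊆ pvU d source) (k : Nat) : (pvF d t)^[k] S ⊆ pvU d source := by
  induction k with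
  | zero => simpa
  | succ k ih => rw [Function.iterate_succ_apply']; exact pvF_subset_U d t source ih

lemma iterate_fix_propagate (d : PySem.Dict Int (List Int)) (t : Int) (S : Finset Int) (k : Nat)
    (h : (pvF d t)^[k+1] S = (pvF d t)^[k] S) :
    ∀ m, k ≤ m → (pvF d t)^[m] S = (pvF d t)^[k] S := by
  intro m hm
  induction m with
  | zero =>
    have : k = 0 := by omega
    subst this; rfl
  | succ m ih =>
    rcases Nat.lt_or_ge k (m+1) with hlt | hge
    · have hkm : k ≤ m := by omega
      rw [Function.iterate_succ_apply', ih hkm, ← Function.iterate_succ_apply' (pvF d t) k S, h]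
    · have : k = m + 1 := by omega
      subst this; rfl

lemma pvReach_fixed (d : PySem.Dict Int (List Int)) (t source : Int) {S : Finset Int}
    (h : S ⊆ pvU d source) : pvF d t (pvReach d t S) = pvReach d t S := by
  -- find a fixpoint index k ≤ card U < pvN
  have hcardU : (pvU d source).card ≤ d.values.flatten.length + 1 := by
    calc (pvU d source).card ≤ d.values.flatten.toFinset.card + 1 := Finset.card_insert_le _ _
    _ ≤ d.values.flatten.length + 1 := by
        exact Nat.add_le_add_right (List.toFinset_card_le _) 1
  by_cases hfix : ∃ k, k ≤ (pvU d source).card ∧ (pvF d t)^[k+1] S = (pvF d t)^[k] S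
  · obtain ⟨k, hk, hfx⟩ := hfix
    have hkN : k ≤ pvN d := by unfold pvN; omega
    have h1 := iterate_fix_propagate d t S k hfx (pvN d) hkN
    have h2 := iterate_fix_propagate d t S k hfx (pvN d + 1) (by omega)
    unfold pvReach
    rw [← Function.iterate_succ_apply' (pvF d t) (pvN d) S, h2, h1]
  · exfalso
    push Not at hfix
    -- card grows at each step up to card U + 1
    have grow : ∀ k, k ≤ (pvU d source).card + 1 → k ≤ ((pvF d t)^[k] S).card := by
      intro k hk
      induction k with
      | zero => omega
      | succ k ih =>
        have hk' : k ≤ (pvU d source).card := by omega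
        have hne := hfix k hk'
        have hsub : (pvF d t)^[k] S ⊆ (pvF d t)^[k+1] S := by
          rw [Function.iterate_succ_apply']; exact subset_pvF d t _
        have hss : (pvF d t)^[k] S ⊂ (pvF d t)^[k+1] S :=
          lt_of_le_of_ne hsub (fun hcontr => hne hcontr.symm)
        have := Finset.card_lt_card hss
        have := ih (by omega)
        omega
    have h1 := grow ((pvU d source).card + 1) le_rfl
    have h2 : ((pvF d t)^[(pvU d source).card + 1] S).card ≤ (pvU d source).card :=
      Finset.card_le_card (iterate_subset_U d t source h _)
    omega

lemma subset_pvReach (d : PySem.Dict Int (List Int)) (t : Int) (S : Finset Int) :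
    S ⊆ pvReach d t S := by
  unfold pvReach
  generalize pvN d = k
  induction k with
  | zero => simp
  | succ k ih =>
    rw [Function.iterate_succ_apply']
    exact ih.trans (subset_pvF d t _)

lemma pvReach_closed (d : PySem.Dict Int (List Int)) (t source : Int) {S : Finset Int}
    (hS : S ⊆ pvU d source) {v e : Int} (hv : v ∈ pvReach d t S) (he : e ∈ pvAdj d t v) :
    e ∈ pvReach d t S := by
  have hfix := pvReach_fixed d t source hS
  rw [← hfix]
  unfold pvF
  exact Finset.mem_union_right _ (Finset.mem_biUnion.2 ⟨v, hv, List.mem_toFinset.2 he⟩)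

lemma pvReach_least (d : PySem.Dict Int (List Int)) (t : Int) {S T : Finset Int}
    (hST : S ⊆ T) (hT : pvF d t T = T) : pvReach d t S ⊆ T := by
  unfold pvReach
  generalize pvN d = k
  induction k with
  | zero => simpa
  | succ k ih =>
    rw [Function.iterate_succ_apply']
    calc pvF d t ((pvF d t)^[k] S) ⊆ pvF d t T := pvF_mono d t ih
    _ = T := hT

lemma pvAdj_seed_subset_U (d : PySem.Dict Int (List Int)) (t source v : Int) :
    (pvAdj d t v).toFinset ⊆ pvU d source := by
  intro e he
  simp only [List.mem_toFinset] at he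
  exact Finset.mem_insert_of_mem (List.mem_toFinset.2 (pvAdj_subset_flatten d t v e he))

lemma pvRch_subset (d : PySem.Dict Int (List Int)) (t source v e : Int)
    (he : e ∈ pvAdj d t v) : pvRch d t e ⊆ pvRch d t v := by
  have hfix : pvF d t (pvRch d t v) = pvRch d t v :=
    pvReach_fixed d t source (pvAdj_seed_subset_U d t source v)
  have heR : e ∈ pvRch d t v := subset_pvReach d t _ (List.mem_toFinset.2 he)
  have hseed : (pvAdj d t e).toFinset ⊆ pvRch d t v := by
    intro x hx
    exact pvReach_closed d t source (pvAdj_seed_subset_U d t source v) heR (List.mem_toFinset.1 hx)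
  exact pvReach_least d t hseed hfix

lemma pvRk_lt (d : PySem.Dict Int (List Int)) (t source v e : Int)
    (hnc : e ∉ pvRch d t e) (hk : e ∈ d.keys) (het : e ≠ t) (he : e ∈ pvAdj d t v) :
    pvRk d t e < pvRk d t v := by
  apply Finset.card_lt_card
  constructor
  · exact Finset.inter_subset_inter_right (pvRch_subset d t source v e he)
  · intro hsub
    have heIn : e ∈ pvRch d t v ∩ (d.keys.toFinset.erase t) :=
      Finset.mem_inter.2 ⟨subset_pvReach d t _ (List.mem_toFinset.2 he),
        Finset.mem_erase.2 ⟨het, List.mem_toFinset.2 hk⟩⟩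
    have := Finset.mem_inter.1 (hsub heIn)
    exact hnc this.1

lemma pvRk_le_size (d : PySem.Dict Int (List Int)) (t v : Int) :
    pvRk d t v ≤ d.size := by
  calc pvRk d t v ≤ (d.keys.toFinset.erase t).card := Finset.card_le_card Finset.inter_subset_right
  _ ≤ d.keys.toFinset.card := Finset.card_le_card (Finset.erase_subset t _)
  _ ≤ d.keys.length := List.toFinset_card_le _
  _ = d.size := by simp [PySem.Dict.keys, PySem.Dict.size]

def pvCnt (d : PySem.Dict Int (List Int)) (t : Int) : Nat → Int → Int
  | 0, v => if v = t then 1 else 0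
  | k + 1, v => if v = t then 1 else ((pvAdj d t v).map (pvCnt d t k)).sum

def pvPops (d : PySem.Dict Int (List Int)) (t : Int) : Nat → Int → Nat
  | 0, _ => 1
  | k + 1, v => if v = t then 1 else 1 + ((pvAdj d t v).map (pvPops d t k)).sum

lemma pvCnt_succ (d : PySem.Dict Int (List Int)) (t : Int) (k : Nat) (v : Int) :
    pvCnt d t (k + 1) v = if v = t then 1 else ((pvAdj d t v).map (pvCnt d t k)).sum := rfl

lemma pvPops_succ (d : PySem.Dict Int (List Int)) (t : Int) (k : Nat) (v : Int) :
    pvPops d t (k + 1) v = if v = t then 1 else 1 + ((pvAdj d t v).map (pvPops d t k)).sum := rfl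

lemma pvCnt_target (d : PySem.Dict Int (List Int)) (t : Int) (k : Nat) : pvCnt d t k t = 1 := by
  cases k <;> simp [pvCnt]

lemma pvAdj_nonkey (d : PySem.Dict Int (List Int)) (t v : Int) (hv : v ∉ d.keys) :
    pvAdj d t v = [] := by
  unfold pvAdj
  split
  · rfl
  · rw [PySem.Dict.getD_eq_get?_getD, (PySem.Dict.get?_eq_none_iff_not_mem_keys d v).2 hv]
    rfl

lemma pvCnt_nonkey (d : PySem.Dict Int (List Int)) (t v : Int) (hv : v ∉ d.keys) (hvt : v ≠ t)
    (k : Nat) : pvCnt d t k v = 0 := by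
  cases k <;> simp [pvCnt, hvt, pvAdj_nonkey d t v hv]

lemma pvPops_target (d : PySem.Dict Int (List Int)) (t : Int) (k : Nat) : pvPops d t k t = 1 := by
  cases k <;> simp [pvPops]

lemma pvPops_nonkey (d : PySem.Dict Int (List Int)) (t v : Int) (hv : v ∉ d.keys) (hvt : v ≠ t)
    (k : Nat) : pvPops d t k v = 1 := by
  cases k <;> simp [pvPops, hvt, pvAdj_nonkey d t v hv]

lemma pvPops_pos (d : PySem.Dict Int (List Int)) (t : Int) (k : Nat) (v : Int) :
    1 ≤ pvPops d t k v := by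
  cases k with
  | zero => simp [pvPops]
  | succ k =>
    unfold pvPops
    split
    · exact le_refl 1
    · omega

lemma pvCnt_stable (d : PySem.Dict Int (List Int)) (t source : Int)
    (hPre : ∀ v ∈ pvReach d t {source}, v ∉ pvRch d t v) :
    ∀ m v, v ∈ pvReach d t {source} → pvRk d t v < m →
      ∀ j k, pvRk d t v < j → pvRk d t v < k → pvCnt d t j v = pvCnt d t k v := by
  have hsrcU : ({source} : Finset Int) ⊆ pvU d source := by
    intro x hx; simp at hx; simp [pvU, hx]
  intro m
  induction m with
  | zero => intro v _ h; omega
  | succ m ih =>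
    intro v hv hm j k hj hk
    obtain ⟨j', rfl⟩ : ∃ j', j = j' + 1 := ⟨j - 1, by omega⟩
    obtain ⟨k', rfl⟩ : ∃ k', k = k' + 1 := ⟨k - 1, by omega⟩
    by_cases hvt : v = t
    · simp [pvCnt, hvt]
    · simp only [pvCnt, if_neg hvt]
      congr 1
      apply List.map_congr_left
      intro e he
      by_cases het : e = t
      · subst het; rw [pvCnt_target, pvCnt_target]
      · by_cases hek : e ∈ d.keys
        · have heR : e ∈ pvReach d t {source} := pvReach_closed d t source hsrcU hv he
          have hlt : pvRk d t e < pvRk d t v :=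
            pvRk_lt d t source v e (hPre e heR) hek het he
          exact ih e heR (by omega) j' k' (by omega) (by omega)
        · rw [pvCnt_nonkey d t e hek het, pvCnt_nonkey d t e hek het]

lemma pvPops_stable (d : PySem.Dict Int (List Int)) (t source : Int)
    (hPre : ∀ v ∈ pvReach d t {source}, v ∉ pvRch d t v) :
    ∀ m v, v ∈ pvReach d t {source} → pvRk d t v < m →
      ∀ j k, pvRk d t v < j → pvRk d t v < k → pvPops d t j v = pvPops d t k v := by
  have hsrcU : ({source} : Finset Int) ⊆ pvU d source := by
    intro x hx; simp at hx; simp [pvU, hx]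
  intro m
  induction m with
  | zero => intro v _ h; omega
  | succ m ih =>
    intro v hv hm j k hj hk
    obtain ⟨j', rfl⟩ : ∃ j', j = j' + 1 := ⟨j - 1, by omega⟩
    obtain ⟨k', rfl⟩ : ∃ k', k = k' + 1 := ⟨k - 1, by omega⟩
    by_cases hvt : v = t
    · simp [pvPops, hvt]
    · simp only [pvPops, if_neg hvt]
      congr 2
      apply List.map_congr_left
      intro e he
      by_cases het : e = t
      · subst het; rw [pvPops_target, pvPops_target]
      · by_cases hek : e ∈ d.keys
        · have heR : e ∈ pvReach d t {source} := pvReach_closed d t source hsrcU hv he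
          have hlt : pvRk d t e < pvRk d t v :=
            pvRk_lt d t source v e (hPre e heR) hek het he
          exact ih e heR (by omega) j' k' (by omega) (by omega)
        · rw [pvPops_nonkey d t e hek het, pvPops_nonkey d t e hek het]

lemma pvAdj_length_le (d : PySem.Dict Int (List Int)) (t v : Int) :
    (pvAdj d t v).length ≤ d.values.flatten.length := by
  unfold pvAdj
  split
  · simp
  · rw [PySem.Dict.getD_eq_get?_getD]
    cases hg : d.get? v with
    | none => simp
    | some l =>
      simp only [Option.getD_some]
      have : (v, l) ∈ d.items := PySem.Dict.mem_items_of_get?_eq_some d hg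
      have hl : l ∈ d.values := List.mem_map.2 ⟨(v, l), this, rfl⟩
      calc l.length ≤ (d.values.map List.length).sum := by
            exact List.single_le_sum (by simp) _ (List.mem_map.2 ⟨l, hl, rfl⟩)
      _ = d.values.flatten.length := List.length_flatten.symm

lemma pvPops_le (d : PySem.Dict Int (List Int)) (t source : Int)
    (hPre : ∀ v ∈ pvReach d t {source}, v ∉ pvRch d t v) :
    ∀ m v, v ∈ pvReach d t {source} → pvRk d t v < m →
      ∀ k, pvPops d t k v ≤ (d.values.flatten.length + 2) ^ m := by
  have hsrcU : ({source} : Finset Int) ⊆ pvU d source := by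
    intro x hx; simp at hx; simp [pvU, hx]
  intro m
  induction m with
  | zero => intro v _ h; omega
  | succ m ih =>
    intro v hv hm k
    set E := d.values.flatten.length with hE
    have hX : 1 ≤ (E + 2) ^ m := Nat.one_le_pow _ _ (by omega)
    have hbig : 1 ≤ (E + 2) ^ (m + 1) := Nat.one_le_pow _ _ (by omega)
    cases k with
    | zero => simpa [pvPops] using hbig
    | succ k =>
      by_cases hvt : v = t
      · simpa [pvPops, hvt] using hbig
      · simp only [pvPops, if_neg hvt]
        have hterm : ∀ x ∈ (pvAdj d t v).map (pvPops d t k), x ≤ (E + 2) ^ m := by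
          intro x hx
          obtain ⟨e, he, rfl⟩ := List.mem_map.1 hx
          by_cases het : e = t
          · subst het; rw [pvPops_target]; omega
          · by_cases hek : e ∈ d.keys
            · have heR : e ∈ pvReach d t {source} := pvReach_closed d t source hsrcU hv he
              have hlt : pvRk d t e < pvRk d t v :=
                pvRk_lt d t source v e (hPre e heR) hek het he
              exact ih e heR (by omega) k
            · rw [pvPops_nonkey d t e hek het]; omega
        have hsum : ((pvAdj d t v).map (pvPops d t k)).sum ≤ (pvAdj d t v).length * (E + 2) ^ m := by
          have := List.sum_le_card_nsmul ((pvAdj d t v).map (pvPops d t k)) ((E + 2) ^ m) hterm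
          simpa [smul_eq_mul] using this
        have hlen : (pvAdj d t v).length ≤ E := pvAdj_length_le d t v
        have : 1 + ((pvAdj d t v).map (pvPops d t k)).sum ≤ 1 + E * (E + 2) ^ m := by
          have := Nat.mul_le_mul_right ((E + 2) ^ m) hlen
          omega
        calc 1 + ((pvAdj d t v).map (pvPops d t k)).sum ≤ 1 + E * (E + 2) ^ m := this
        _ ≤ (E + 2) ^ (m + 1) := by
            rw [pow_succ]
            nlinarith [hX]

lemma dfsLoop_eq (d : PySem.Dict Int (List Int)) (t source : Int)
    (hPre : ∀ v ∈ pvReach d t {source}, v ∉ pvRch d t v) :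
    ∀ f (s : List Int) (r : Int), (∀ v ∈ s, v ∈ pvReach d t {source}) →
      (s.map (pvPops d t (d.size + 1))).sum ≤ f →
      dfsLoop d t f s r = r + (s.map (pvCnt d t (d.size + 1))).sum := by
  have hsrcU : ({source} : Finset Int) ⊆ pvU d source := by
    intro x hx; simp at hx; simp [pvU, hx]
  intro f
  induction f with
  | zero =>
    intro s r hs hf
    cases s with
    | nil => simp [dfsLoop]
    | cons v s =>
      exfalso
      have := pvPops_pos d t (d.size + 1) v
      simp only [List.map_cons, List.sum_cons] at hf
      omega
  | succ f ih =>
    intro s r hs hf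
    cases s with
    | nil => simp [dfsLoop]
    | cons v s =>
      have hvR : v ∈ pvReach d t {source} := hs v (List.mem_cons_self ..)
      have hsR : ∀ u ∈ s, u ∈ pvReach d t {source} := fun u hu => hs u (List.mem_cons_of_mem _ hu)
      simp only [List.map_cons, List.sum_cons] at hf
      by_cases hvt : v = t
      · simp only [dfsLoop]
        rw [if_pos hvt]
        have hp1 : pvPops d t (d.size + 1) v = 1 := by rw [hvt]; exact pvPops_target d t _
        rw [ih s (r + 1) hsR (by omega)]
        rw [List.map_cons, List.sum_cons, hvt, pvCnt_target]
        ring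
      · simp only [dfsLoop, if_neg hvt]
        cases hg : d.get? v with
        | none =>
          show dfsLoop d t f s r = r + (List.map (pvCnt d t (d.size + 1)) (v :: s)).sum
          have hvk : v ∉ d.keys := (PySem.Dict.get?_eq_none_iff_not_mem_keys d v).1 hg
          rw [ih s r hsR (by have := pvPops_pos d t (d.size + 1) v; omega)]
          rw [List.map_cons, List.sum_cons, pvCnt_nonkey d t v hvk hvt]
          ring
        | some edges =>
          show dfsLoop d t f (edges.reverse ++ s) r = r + (List.map (pvCnt d t (d.size + 1)) (v :: s)).sum
          have hadj : pvAdj d t v = edges := by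
            unfold pvAdj
            rw [if_neg hvt, PySem.Dict.getD_eq_get?_getD, hg]
            rfl
          have hedgeR : ∀ e ∈ edges, e ∈ pvReach d t {source} := by
            intro e he
            exact pvReach_closed d t source hsrcU hvR (by rw [hadj]; exact he)
          have hstackR : ∀ u ∈ edges.reverse ++ s, u ∈ pvReach d t {source} := by
            intro u hu
            rcases List.mem_append.1 hu with h | h
            · exact hedgeR u (List.mem_reverse.1 h)
            · exact hsR u h
          -- stabilized sums over edges
          have hstab : ∀ e ∈ edges, pvPops d t d.size e = pvPops d t (d.size + 1) e ∧
              pvCnt d t d.size e = pvCnt d t (d.size + 1) e := by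
            intro e he
            have heA : e ∈ pvAdj d t v := by rw [hadj]; exact he
            by_cases het : e = t
            · subst het
              exact ⟨by rw [pvPops_target, pvPops_target], by rw [pvCnt_target, pvCnt_target]⟩
            · by_cases hek : e ∈ d.keys
              · have heR : e ∈ pvReach d t {source} := hedgeR e he
                have hlt : pvRk d t e < pvRk d t v :=
                  pvRk_lt d t source v e (hPre e heR) hek het heA
                have hvle : pvRk d t v ≤ d.size := pvRk_le_size d t v
                constructor
                · exact pvPops_stable d t source hPre (pvRk d t e + 1) e heR (by omega)
                    d.size (d.size + 1) (by omega) (by omega)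
                · exact pvCnt_stable d t source hPre (pvRk d t e + 1) e heR (by omega)
                    d.size (d.size + 1) (by omega) (by omega)
              · exact ⟨by rw [pvPops_nonkey d t e hek het, pvPops_nonkey d t e hek het],
                  by rw [pvCnt_nonkey d t e hek het, pvCnt_nonkey d t e hek het]⟩
          have hpopsv : pvPops d t (d.size + 1) v = 1 + (edges.map (pvPops d t (d.size + 1))).sum := by
            rw [pvPops_succ, if_neg hvt, hadj]
            congr 2
            apply List.map_congr_left
            intro e he
            exact (hstab e he).1
          have hcntv : pvCnt d t (d.size + 1) v = (edges.map (pvCnt d t (d.size + 1))).sum := by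
            rw [pvCnt_succ, if_neg hvt, hadj]
            congr 1
            apply List.map_congr_left
            intro e he
            exact (hstab e he).2
          have hfuel : ((edges.reverse ++ s).map (pvPops d t (d.size + 1))).sum ≤ f := by
            rw [List.map_append, List.sum_append, List.map_reverse, List.sum_reverse]
            omega
          rw [ih (edges.reverse ++ s) r hstackR hfuel]
          simp only [List.map_append, List.sum_append, List.map_reverse, List.sum_reverse,
            List.map_cons, List.sum_cons, hcntv]

lemma bfsPush_aux :
    ∀ (es : List Int) (sn : PySem.Dict Int Bool) (ps : List Int),
    sn.keys.Nodup → ps.Nodup → (∀ x ∈ ps, x ∈ sn.keys) →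
    (es.foldl (fun (p : PySem.Dict Int Bool × List Int) e =>
        if p.1.contains e then p else (p.1.insert e true, p.2 ++ [e])) (sn, ps)).1.keys.Nodup ∧
    (∀ x, x ∈ (es.foldl (fun (p : PySem.Dict Int Bool × List Int) e =>
        if p.1.contains e then p else (p.1.insert e true, p.2 ++ [e])) (sn, ps)).1.keys ↔
        x ∈ sn.keys ∨ x ∈ es) ∧
    (es.foldl (fun (p : PySem.Dict Int Bool × List Int) e =>
        if p.1.contains e then p else (p.1.insert e true, p.2 ++ [e])) (sn, ps)).2.Nodup ∧
    (∀ x, x ∈ (es.foldl (fun (p : PySem.Dict Int Bool × List Int) e =>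
        if p.1.contains e then p else (p.1.insert e true, p.2 ++ [e])) (sn, ps)).2 ↔
        x ∈ ps ∨ (x ∈ es ∧ x ∉ sn.keys)) := by
  intro es
  induction es with
  | nil =>
    intro sn ps h1 h2 h3
    refine ⟨h1, by simp, h2, by simp⟩
  | cons e es ih =>
    intro sn ps h1 h2 h3
    simp only [List.foldl_cons]
    by_cases hc : sn.contains e = true
    · rw [if_pos hc]
      have hek : e ∈ sn.keys := (PySem.Dict.contains_iff_mem_keys sn e).1 hc
      obtain ⟨c1, c2, c3, c4⟩ := ih sn ps h1 h2 h3
      refine ⟨c1, ?_, c3, ?_⟩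
      · intro x
        rw [c2]
        constructor
        · rintro (h | h)
          · exact Or.inl h
          · exact Or.inr (List.mem_cons_of_mem _ h)
        · rintro (h | h)
          · exact Or.inl h
          · rcases List.mem_cons.1 h with rfl | h
            · exact Or.inl hek
            · exact Or.inr h
      · intro x
        rw [c4]
        constructor
        · rintro (h | ⟨h, h'⟩)
          · exact Or.inl h
          · exact Or.inr ⟨List.mem_cons_of_mem _ h, h'⟩
        · rintro (h | ⟨h, h'⟩)
          · exact Or.inl h
          · rcases List.mem_cons.1 h with rfl | h
            · exact absurd hek h'
            · exact Or.inr ⟨h, h'⟩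
    · rw [if_neg hc]
      have hek : e ∉ sn.keys := fun h =>
        hc ((PySem.Dict.contains_iff_mem_keys sn e).2 h)
      have h1' : (sn.insert e true).keys.Nodup := PySem.Dict.nodup_keys_insert sn e true h1
      have h2' : (ps ++ [e]).Nodup := by
        refine List.Nodup.append h2 (List.nodup_singleton e) ?_
        intro x hx hx'
        simp at hx'
        subst hx'
        exact hek (h3 x hx)
      have h3' : ∀ x ∈ ps ++ [e], x ∈ (sn.insert e true).keys := by
        intro x hx
        rcases List.mem_append.1 hx with h | h
        · exact (PySem.Dict.mem_keys_insert sn e x true).2 (Or.inr (h3 x h))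
        · have hx' : x = e := by simpa using h
          exact (PySem.Dict.mem_keys_insert sn e x true).2 (Or.inl hx')
      obtain ⟨c1, c2, c3, c4⟩ := ih (sn.insert e true) (ps ++ [e]) h1' h2' h3'
      refine ⟨c1, ?_, c3, ?_⟩
      · intro x
        rw [c2, PySem.Dict.mem_keys_insert sn e _ true]
        constructor
        · rintro ((rfl | h) | h)
          · exact Or.inr (List.mem_cons_self ..)
          · exact Or.inl h
          · exact Or.inr (List.mem_cons_of_mem _ h)
        · rintro (h | h)
          · exact Or.inl (Or.inr h)
          · rcases List.mem_cons.1 h with rfl | h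
            · exact Or.inl (Or.inl rfl)
            · exact Or.inr h
      · intro x
        rw [c4, List.mem_append, PySem.Dict.mem_keys_insert sn e _ true]
        constructor
        · rintro ((h | h) | ⟨h, h'⟩)
          · exact Or.inl h
          · simp at h
            subst h
            exact Or.inr ⟨List.mem_cons_self .., hek⟩
          · have hxe : ¬ x = e := fun hh => h' (Or.inl hh)
            have hxs : x ∉ sn.keys := fun hh => h' (Or.inr hh)
            exact Or.inr ⟨List.mem_cons_of_mem _ h, hxs⟩
        · rintro (h | ⟨h, h'⟩)
          · exact Or.inl (Or.inl h)
          · rcases List.mem_cons.1 h with rfl | h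
            · exact Or.inl (Or.inr (by simp))
            · by_cases hxe : x = e
              · exact Or.inl (Or.inr (by simp [hxe]))
              · exact Or.inr ⟨h, fun hh => (by
                  rcases hh with hh | hh
                  · exact hxe hh
                  · exact h' hh)⟩

lemma bfsLoop_spec (d : PySem.Dict Int (List Int)) (t source : Int) :
    ∀ f (sn : PySem.Dict Int Bool) (fr : List Int),
    sn.keys.Nodup → fr.Nodup → (∀ x ∈ fr, x ∈ sn.keys) →
    (∀ x ∈ sn.keys, x ∈ pvReach d t {source}) →
    (∀ v ∈ sn.keys, v ∉ fr → ∀ e ∈ pvAdj d t v, e ∈ sn.keys) →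
    fr.length + ((pvU d source).card - (sn.keys.toFinset ∩ pvU d source).card) ≤ f →
    (bfsLoop d t f sn fr).keys.Nodup ∧
    (∀ x ∈ sn.keys, x ∈ (bfsLoop d t f sn fr).keys) ∧
    (∀ x ∈ (bfsLoop d t f sn fr).keys, x ∈ pvReach d t {source}) ∧
    (∀ v ∈ (bfsLoop d t f sn fr).keys, ∀ e ∈ pvAdj d t v, e ∈ (bfsLoop d t f sn fr).keys) := by
  have hsrcU : ({source} : Finset Int) ⊆ pvU d source := by
    intro x hx; simp at hx; simp [pvU, hx]
  intro f
  induction f with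
  | zero =>
    intro sn fr h1 h2 h3 h4 h5 hμ
    have hfr : fr = [] := by
      cases fr with
      | nil => rfl
      | cons a l => simp at hμ
    subst hfr
    exact ⟨h1, fun x hx => hx, h4, fun v hv e he => h5 v hv (by simp) e he⟩
  | succ f ih =>
    intro sn fr h1 h2 h3 h4 h5 hμ
    cases fr with
    | nil =>
      exact ⟨h1, fun x hx => hx, h4, fun v hv e he => h5 v hv (by simp) e he⟩
    | cons v fr =>
      by_cases hvt : v = t
      · show (bfsLoop d t (f+1) sn (v :: fr)).keys.Nodup ∧ _
        have hstep : bfsLoop d t (f + 1) sn (v :: fr) = bfsLoop d t f sn fr := by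
          simp only [bfsLoop, if_pos hvt]
        rw [hstep]
        apply ih sn fr h1 h2.of_cons (fun x hx => h3 x (List.mem_cons_of_mem _ hx)) h4
        · intro u hu hufr e he
          by_cases huv : u = v
          · subst huv
            rw [hvt] at he
            simp [pvAdj] at he
          · exact h5 u hu (by simp [huv, hufr]) e he
        · simp only [List.length_cons] at hμ
          omega
      · have hstep : bfsLoop d t (f + 1) sn (v :: fr) =
            bfsLoop d t f
              ((d.getD v []).foldl (fun (p : PySem.Dict Int Bool × List Int) e =>
                if p.1.contains e then p else (p.1.insert e true, p.2 ++ [e])) (sn, [])).1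
              (((d.getD v []).foldl (fun (p : PySem.Dict Int Bool × List Int) e =>
                if p.1.contains e then p else (p.1.insert e true, p.2 ++ [e])) (sn, [])).2.reverse ++ fr) := by
          simp only [bfsLoop, if_neg hvt]
        rw [hstep]
        set es := d.getD v [] with hes
        have hadj : pvAdj d t v = es := by unfold pvAdj; rw [if_neg hvt]
        obtain ⟨c1, c2, c3, c4⟩ := bfsPush_aux es sn [] h1 (List.nodup_nil) (by simp)
        set sn' := (es.foldl (fun (p : PySem.Dict Int Bool × List Int) e =>
          if p.1.contains e then p else (p.1.insert e true, p.2 ++ [e])) (sn, [])).1 with hsn'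
        set q := (es.foldl (fun (p : PySem.Dict Int Bool × List Int) e =>
          if p.1.contains e then p else (p.1.insert e true, p.2 ++ [e])) (sn, [])).2 with hq
        have hqmem : ∀ x, x ∈ q ↔ x ∈ es ∧ x ∉ sn.keys := by
          intro x; rw [c4 x]; simp
        have hvsn : v ∈ sn.keys := h3 v (List.mem_cons_self ..)
        have hvR : v ∈ pvReach d t {source} := h4 v hvsn
        have hesR : ∀ e ∈ es, e ∈ pvReach d t {source} := by
          intro e he
          exact pvReach_closed d t source hsrcU hvR (by rw [hadj]; exact he)
        -- hypotheses for ih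
        have h2' : (q.reverse ++ fr).Nodup := by
          refine List.Nodup.append (List.nodup_reverse.2 c3) h2.of_cons ?_
          intro x hx hx'
          have := (hqmem x).1 (List.mem_reverse.1 hx)
          exact this.2 (h3 x (List.mem_cons_of_mem _ hx'))
        have h3' : ∀ x ∈ q.reverse ++ fr, x ∈ sn'.keys := by
          intro x hx
          rcases List.mem_append.1 hx with h | h
          · exact (c2 x).2 (Or.inr ((hqmem x).1 (List.mem_reverse.1 h)).1)
          · exact (c2 x).2 (Or.inl (h3 x (List.mem_cons_of_mem _ h)))
        have h4' : ∀ x ∈ sn'.keys, x ∈ pvReach d t {source} := by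
          intro x hx
          rcases (c2 x).1 hx with h | h
          · exact h4 x h
          · exact hesR x h
        have h5' : ∀ u ∈ sn'.keys, u ∉ q.reverse ++ fr → ∀ e ∈ pvAdj d t u, e ∈ sn'.keys := by
          intro u hu hufr e he
          by_cases huv : u = v
          · subst huv
            rw [hadj] at he
            exact (c2 e).2 (Or.inr he)
          · rcases (c2 u).1 hu with h | h
            · have hufr' : u ∉ v :: fr := by
                intro hc
                rcases List.mem_cons.1 hc with hc | hc
                · exact huv hc
                · exact hufr (List.mem_append.2 (Or.inr hc))
              exact (c2 e).2 (Or.inl (h5 u h hufr' e he))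
            · by_cases husn : u ∈ sn.keys
              · have hufr' : u ∉ v :: fr := by
                  intro hc
                  rcases List.mem_cons.1 hc with hc | hc
                  · exact huv hc
                  · exact hufr (List.mem_append.2 (Or.inr hc))
                exact (c2 e).2 (Or.inl (h5 u husn hufr' e he))
              · exact absurd (List.mem_append.2 (Or.inl (List.mem_reverse.2 ((hqmem u).2 ⟨h, husn⟩)))) hufr
        -- fuel
        have hesU : es.toFinset ⊆ pvU d source := by
          intro x hx
          simp only [List.mem_toFinset] at hx
          exact Finset.mem_insert_of_mem (List.mem_toFinset.2
            (pvAdj_subset_flatten d t v x (by rw [hadj]; exact hx)))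
        have hsn'F : sn'.keys.toFinset = sn.keys.toFinset ∪ es.toFinset := by
          ext x
          simp only [List.mem_toFinset, Finset.mem_union]
          exact c2 x
        have hqlen : q.length = (es.toFinset \ sn.keys.toFinset).card := by
          rw [← List.toFinset_card_of_nodup c3]
          congr 1
          ext x
          simp only [List.mem_toFinset, Finset.mem_sdiff]
          exact hqmem x
        have hcard : (sn'.keys.toFinset ∩ pvU d source).card =
            (sn.keys.toFinset ∩ pvU d source).card + q.length := by
          rw [hsn'F, Finset.union_inter_distrib_right]
          have hesInter : es.toFinset ∩ pvU d source = es.toFinset :=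
            Finset.inter_eq_left.2 hesU
          rw [hesInter]
          rw [hqlen]
          have : es.toFinset \ sn.keys.toFinset =
              es.toFinset \ (sn.keys.toFinset ∩ pvU d source) := by
            ext x
            simp only [Finset.mem_sdiff, Finset.mem_inter]
            constructor
            · rintro ⟨hx, hx'⟩; exact ⟨hx, fun hc => hx' hc.1⟩
            · rintro ⟨hx, hx'⟩; exact ⟨hx, fun hc => hx' ⟨hc, hesU hx⟩⟩
          rw [this, ← Finset.union_sdiff_self_eq_union,
            Finset.card_union_of_disjoint Finset.disjoint_sdiff]
        have hμ' : (q.reverse ++ fr).length +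
            ((pvU d source).card - (sn'.keys.toFinset ∩ pvU d source).card) ≤ f := by
          have hle : (sn'.keys.toFinset ∩ pvU d source).card ≤ (pvU d source).card :=
            Finset.card_le_card Finset.inter_subset_right
          simp only [List.length_append, List.length_reverse, List.length_cons] at hμ ⊢
          omega
        obtain ⟨r1, r2, r3, r4⟩ := ih sn' (q.reverse ++ fr) c1 h2' h3' h4' h5' hμ'
        exact ⟨r1, fun x hx => r2 x ((c2 x).2 (Or.inl hx)), r3, r4⟩

def pvSeen (d : PySem.Dict Int (List Int)) (source t : Int) : PySem.Dict Int Bool :=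
  bfsLoop d t (pvN d) (PySem.Dict.ofList [(source, true)]) [source]

def pvKs (d : PySem.Dict Int (List Int)) (source t : Int) : List Int :=
  (pvSeen d source t).keys.filter (fun v => decide (v ≠ t) && d.contains v)

lemma pvSeen_spec (d : PySem.Dict Int (List Int)) (t source : Int) :
    (pvSeen d source t).keys.Nodup ∧
    ((pvSeen d source t).keys.toFinset = pvReach d t {source}) := by
  have hkeys0 : (PySem.Dict.ofList [(source, true)]).keys = [source] := rfl
  have hsrcU : source ∈ pvU d source := Finset.mem_insert_self _ _
  have hcardU : (pvU d source).card ≤ d.values.flatten.length + 1 := by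
    calc (pvU d source).card ≤ d.values.flatten.toFinset.card + 1 := Finset.card_insert_le _ _
    _ ≤ d.values.flatten.length + 1 := Nat.add_le_add_right (List.toFinset_card_le _) 1
  have hμ : (1 : Nat) + ((pvU d source).card -
      ((PySem.Dict.ofList [(source, true)]).keys.toFinset ∩ pvU d source).card) ≤ pvN d := by
    rw [hkeys0]
    have hsing : ([source] : List Int).toFinset = ({source} : Finset Int) := by simp
    rw [hsing, Finset.singleton_inter_of_mem hsrcU]
    simp only [Finset.card_singleton]
    unfold pvN
    omega
  obtain ⟨r1, r2, r3, r4⟩ := bfsLoop_spec d t source (pvN d)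
    (PySem.Dict.ofList [(source, true)]) [source]
    (by rw [hkeys0]; exact List.nodup_singleton _)
    (List.nodup_singleton _)
    (by intro x hx; rw [hkeys0]; exact hx)
    (by
      intro x hx
      rw [hkeys0] at hx
      simp at hx
      rw [hx]
      exact subset_pvReach d t {source} (Finset.mem_singleton_self source))
    (by
      intro v hv hvfr e he
      exfalso
      rw [hkeys0] at hv
      simp at hv
      exact hvfr (by simp [hv]))
    hμ
  refine ⟨r1, ?_⟩
  apply Finset.Subset.antisymm
  · intro x hx
    exact r3 x (List.mem_toFinset.1 hx)
  · apply pvReach_least d t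
    · intro x hx
      simp only [Finset.mem_singleton] at hx
      rw [hx]
      exact List.mem_toFinset.2 (r2 source (by rw [hkeys0]; exact List.mem_cons_self ..))
    · unfold pvF
      apply Finset.union_eq_left.2
      intro x hx
      obtain ⟨v, hv, hxv⟩ := Finset.mem_biUnion.1 hx
      exact List.mem_toFinset.2 (r4 v (List.mem_toFinset.1 hv) x (List.mem_toFinset.1 hxv))

def pvStep2 (d : PySem.Dict Int (List Int)) (t : Int) (ks : List Int)
    (c : PySem.Dict Int Int) : PySem.Dict Int Int :=
  PySem.Dict.ofList (ks.map (fun v =>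
    (v, ((d.getD v []).map (fun e => c.getD e (if e = t then (1 : Int) else 0))).sum)))

lemma map_comp_fst {β : Type} (ks : List Int) (g : Int → β) :
    List.map (Prod.fst ∘ fun v => (v, g v)) ks = ks := by
  induction ks with
  | nil => rfl
  | cons a l ih => simp only [List.map_cons, ih]; rfl

lemma map_comp_fst' {β : Type} (ks : List Int) (g : Int → β) :
    List.map ((fun x => x.1) ∘ fun v => (v, g v)) ks = ks := by
  induction ks with
  | nil => rfl
  | cons a l ih => simp only [List.map_cons, ih]; rfl

lemma pvStep2_items (d : PySem.Dict Int (List Int)) (t : Int) (ks : List Int) (hnd : ks.Nodup)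
    (c : PySem.Dict Int Int) :
    (pvStep2 d t ks c).items = ks.map (fun v =>
      (v, ((d.getD v []).map (fun e => c.getD e (if e = t then (1 : Int) else 0))).sum)) := by
  unfold pvStep2
  set m := ks.map (fun v =>
    (v, ((d.getD v []).map (fun e => c.getD e (if e = t then (1 : Int) else 0))).sum)) with hm
  have h1 : PySem.Dict.ofList m =
      m.foldl (fun (acc : PySem.Dict Int Int) a => acc.insert a.1 a.2) PySem.Dict.empty := rfl
  rw [h1, PySem.Dict.items_foldl_insert_fresh m Prod.fst Prod.snd PySem.Dict.empty
    (by intro a _; simp) (by rw [hm, List.map_map, map_comp_fst]; exact hnd)]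
  simp [show (PySem.Dict.empty : PySem.Dict Int Int).items = [] from rfl]

lemma pvStep2_getD (d : PySem.Dict Int (List Int)) (t : Int) (ks : List Int) (hnd : ks.Nodup)
    (c : PySem.Dict Int Int) (v : Int) :
    (pvStep2 d t ks c).getD v (if v = t then 1 else 0) =
      if v ∈ ks then ((d.getD v []).map (fun e => c.getD e (if e = t then (1 : Int) else 0))).sum
      else (if v = t then 1 else 0) := by
  have hkeys : (pvStep2 d t ks c).keys = ks := by
    unfold PySem.Dict.keys
    rw [pvStep2_items d t ks hnd c, List.map_map, map_comp_fst']
  have hndS : (pvStep2 d t ks c).keys.Nodup := by rw [hkeys]; exact hnd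
  by_cases hv : v ∈ ks
  · rw [if_pos hv]
    have hmem : (v, ((d.getD v []).map (fun e => c.getD e (if e = t then (1 : Int) else 0))).sum)
        ∈ (pvStep2 d t ks c).items := by
      rw [pvStep2_items d t ks hnd c]
      exact List.mem_map.2 ⟨v, hv, rfl⟩
    have hget := (PySem.Dict.get?_eq_some_iff_mem_items _ v _ hndS).2 hmem
    rw [PySem.Dict.getD_eq_get?_getD, hget, Option.getD_some]
  · rw [if_neg hv]
    have hnone : (pvStep2 d t ks c).get? v = none := by
      rw [PySem.Dict.get?_eq_none_iff_not_mem_keys, hkeys]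
      exact hv
    rw [PySem.Dict.getD_eq_get?_getD, hnone, Option.getD_none]

lemma pvIter2_getD (d : PySem.Dict Int (List Int)) (t source : Int) (ks : List Int)
    (hnd : ks.Nodup)
    (hks : ∀ v, v ∈ ks ↔ v ∈ pvReach d t {source} ∧ v ≠ t ∧ v ∈ d.keys) :
    ∀ k v, v ∈ pvReach d t {source} →
      ((pvStep2 d t ks)^[k] PySem.Dict.empty).getD v (if v = t then 1 else 0) = pvCnt d t k v := by
  have hsrcU : ({source} : Finset Int) ⊆ pvU d source := by
    intro x hx; simp at hx; simp [pvU, hx]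
  intro k
  induction k with
  | zero =>
    intro v _
    rw [Function.iterate_zero_apply, PySem.Dict.getD_empty]
    rfl
  | succ k ih =>
    intro v hvR
    rw [Function.iterate_succ_apply', pvStep2_getD d t ks hnd _ v, pvCnt_succ]
    by_cases hv : v ∈ ks
    · obtain ⟨_, hvt, hvk⟩ := (hks v).1 hv
      rw [if_pos hv, if_neg hvt]
      have hadj : pvAdj d t v = d.getD v [] := by unfold pvAdj; rw [if_neg hvt]
      rw [← hadj]
      congr 1
      apply List.map_congr_left
      intro e he
      exact ih e (pvReach_closed d t source hsrcU hvR he)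
    · rw [if_neg hv]
      by_cases hvt : v = t
      · rw [if_pos hvt, if_pos hvt]
      · rw [if_neg hvt, if_neg hvt]
        have hvk : v ∉ d.keys := fun hk => hv ((hks v).2 ⟨hvR, hvt, hk⟩)
        rw [pvAdj_nonkey d t v hvk]
        simp

lemma pvKs_mem (d : PySem.Dict Int (List Int)) (source t : Int) :
    ∀ v, v ∈ pvKs d source t ↔ v ∈ pvReach d t {source} ∧ v ≠ t ∧ v ∈ d.keys := by
  obtain ⟨hnd, hF⟩ := pvSeen_spec d t source
  intro v
  unfold pvKs
  rw [List.mem_filter]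
  constructor
  · rintro ⟨h1, h2⟩
    simp only [Bool.and_eq_true, decide_eq_true_eq] at h2
    exact ⟨by rw [← hF]; exact List.mem_toFinset.2 h1, h2.1,
      (PySem.Dict.contains_iff_mem_keys d v).1 h2.2⟩
  · rintro ⟨h1, h2, h3⟩
    refine ⟨List.mem_toFinset.1 (by rw [hF]; exact h1), ?_⟩
    simp only [Bool.and_eq_true, decide_eq_true_eq]
    exact ⟨h2, (PySem.Dict.contains_iff_mem_keys d v).2 h3⟩

lemma pvKs_nodup (d : PySem.Dict Int (List Int)) (source t : Int) : (pvKs d source t).Nodup :=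
  (pvSeen_spec d t source).1.filter _

lemma foldl_range_iterate {α : Type} (g : α → α) (init : α) (n : Nat) :
    (List.range n).foldl (fun a _ => g a) init = g^[n] init := by
  induction n with
  | zero => rfl
  | succ n ih =>
    rw [List.range_succ, List.foldl_append, ih, List.foldl_cons, List.foldl_nil,
      Function.iterate_succ_apply']

lemma dfs_alt_eq (input : List (Int × List Int)) (source target : Int) :
    dfs_alt input source target =
      pvCnt (PySem.Dict.ofList input) target
        ((pvKs (PySem.Dict.ofList input) source target).length + 1) source := by
  show (((List.range ((pvKs (PySem.Dict.ofList input) source target).length + 1)).foldl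
      (fun c _ => pvStep2 (PySem.Dict.ofList input) target
        (pvKs (PySem.Dict.ofList input) source target) c) PySem.Dict.empty)).getD source
      (if source = target then 1 else 0) = _
  rw [foldl_range_iterate]
  exact pvIter2_getD (PySem.Dict.ofList input) target source
    (pvKs (PySem.Dict.ofList input) source target)
    (pvKs_nodup (PySem.Dict.ofList input) source target)
    (pvKs_mem (PySem.Dict.ofList input) source target)
    _ source (subset_pvReach _ _ {source} (Finset.mem_singleton_self source))

lemma dfs_eq_alt : ∀ (input : List (Int × List Int)) (source : Int) (target : Int),
    Pre_dfs input source target → dfs input source target = dfs_alt input source target := by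
  intro input source target hPre
  unfold Pre_dfs at hPre
  set d := PySem.Dict.ofList input with hd
  have hsrcU : ({source} : Finset Int) ⊆ pvU d source := by
    intro x hx; simp at hx; simp [pvU, hx]
  have hsrc : source ∈ pvReach d target {source} :=
    subset_pvReach d target {source} (Finset.mem_singleton_self source)
  have hpops : pvPops d target (d.size + 1) source ≤ dfsFuel d := by
    have h1 := pvPops_le d target source hPre (d.size + 1) source hsrc
      (by have := pvRk_le_size d target source; omega) (d.size + 1)
    calc pvPops d target (d.size + 1) source ≤ (d.values.flatten.length + 2) ^ (d.size + 1) := h1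
    _ ≤ (d.values.flatten.length + 2) ^ (d.size + 2) :=
        Nat.pow_le_pow_right (by omega) (by omega)
  have hA : dfs input source target = pvCnt d target (d.size + 1) source := by
    show dfsLoop d target (dfsFuel d) [source] 0 = _
    rw [dfsLoop_eq d target source hPre (dfsFuel d) [source] 0
      (by intro v hv; simp at hv; rw [hv]; exact hsrc)
      (by simpa using hpops)]
    simp
  -- rank of source is at most the number of reachable keys
  have hRfix : pvF d target (pvReach d target {source}) = pvReach d target {source} :=
    pvReach_fixed d target source hsrcU
  have hRchR : pvRch d target source ⊆ pvReach d target {source} := by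
    apply pvReach_least d target ?_ hRfix
    intro x hx
    exact pvReach_closed d target source hsrcU hsrc (List.mem_toFinset.1 hx)
  have hRk : pvRk d target source ≤ (pvKs d source target).length := by
    have hsub : pvRch d target source ∩ (d.keys.toFinset.erase target) ⊆
        (pvKs d source target).toFinset := by
      intro x hx
      obtain ⟨hx1, hx2⟩ := Finset.mem_inter.1 hx
      obtain ⟨hxt, hxk⟩ := Finset.mem_erase.1 hx2
      exact List.mem_toFinset.2 ((pvKs_mem d source target x).2
        ⟨hRchR hx1, hxt, List.mem_toFinset.1 hxk⟩)
    calc pvRk d target source ≤ (pvKs d source target).toFinset.card :=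
        Finset.card_le_card hsub
    _ = (pvKs d source target).length := List.toFinset_card_of_nodup (pvKs_nodup d source target)
  have hB : dfs_alt input source target = pvCnt d target (d.size + 1) source := by
    rw [dfs_alt_eq]
    exact pvCnt_stable d target source hPre (pvRk d target source + 1) source hsrc
      (Nat.lt_succ_self _) ((pvKs d source target).length + 1) (d.size + 1)
      (by omega) (by have := pvRk_le_size d target source; omega)
  rw [hA, hB]

-- ===== VERDICT (by name: the statement is the Claim_ definition above) =====
theorem dfs_spec : Claim_equal_dfs := by
  intro input source target _ hPre
  exact dfs_eq_alt input source target hPre
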